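-- pv_equiv track=rewrite | github.com/dave-ck/TicTacMo- | board_reduce.py | legal_inversions
-- ===== SOURCE A (Python) =====
-- def legal_inversions(invert, k):
--     inversions_return = [invert]
--     for i in range(k):
--         if invert[i] is None:
--             additions = []
--             for invert_1 in inversions_return:
--                 invert_2 = invert_1.copy()
--                 invert_1[i] = True
--                 invert_2[i] = False
--                 additions.append(invert_2)
--             inversions_return.extend(additions)
--     return inversions_return
-- ===== SOURCE B (Python) =====
-- def legal_inversions(invert, k):
--     positions = [i for i in range(k) if invert[i] is None]
--     base = invert.copy()
--     for i in positions:
--         base[i] = True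
--     out = []
--     for j in range(2 ** len(positions)):
--         lst = base.copy()
--         for t, pos in enumerate(positions):
--             if (j // 2 ** t) % 2 == 1:
--                 lst[pos] = False
--         out.append(lst)
--     return out
-- ===== Notes on version B (the rewrite author's own statement) =====
-- stated objective: alternative
-- what changed: A doubles a shared accumulator in place while scanning range(k); B first collects the None positions once, builds an all-True base copy, and generates the j-th completion directly from the bits of a counter j in range(2**m), so the result list is indexed rather than grown by repeated in-place doubling (B also leaves the input list unmutated, unlike A).
import Mathlib
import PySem

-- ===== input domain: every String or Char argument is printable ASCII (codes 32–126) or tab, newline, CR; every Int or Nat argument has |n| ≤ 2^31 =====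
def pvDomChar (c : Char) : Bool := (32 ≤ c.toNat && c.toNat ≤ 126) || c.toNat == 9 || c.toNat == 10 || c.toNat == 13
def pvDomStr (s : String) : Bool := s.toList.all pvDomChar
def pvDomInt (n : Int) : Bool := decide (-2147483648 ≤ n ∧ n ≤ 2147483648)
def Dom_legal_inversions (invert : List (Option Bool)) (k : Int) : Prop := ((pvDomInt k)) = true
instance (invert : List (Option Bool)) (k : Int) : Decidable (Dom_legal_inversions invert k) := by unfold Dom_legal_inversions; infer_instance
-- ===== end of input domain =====

-- B replaces A's in-place doubling of a shared accumulator by indexing the 2^m completions with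
-- the bits of a counter (alternative decomposition, same cost). Equivalence is about the RETURN
-- value only: Python A mutates `invert` (and the lists it accumulates) in place, B does not.

-- ===== PORT A =====
-- Python A mutates the lists in `inversions_return` in place; `invert` stays element 0 of the
-- accumulator and is mutated too, so the `invert[i] is None` test reads the accumulator's head.
def legal_inversions (invert : List (Option Bool)) (k : Int) : List (List (Option Bool)) :=
  (PySem.List.pyRange 0 k 1).foldl
    (fun st i =>
      match PySem.List.pyGet? (st.headD []) i with
      | some none =>
          st.map (fun l => l.set i.toNat (some true)) ++ st.map (fun l => l.set i.toNat (some false))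
      | _ => st)
    [invert]

-- ===== PORT B =====
def legal_inversions_alt (invert : List (Option Bool)) (k : Int) : List (List (Option Bool)) :=
  let positions := (PySem.List.pyRange 0 k 1).filter (fun i => PySem.List.pyGet? invert i == some none)
  let base := positions.foldl (fun l i => l.set i.toNat (some true)) invert
  (PySem.List.pyRange 0 ((2:Int) ^ positions.length) 1).map (fun j =>
    (PySem.List.enumerate positions 0).foldl
      (fun l tp =>
        if PySem.Int.mod (PySem.Int.floordiv j ((2:Int) ^ tp.1.toNat)) 2 = 1 then
          l.set tp.2.toNat (some false)
        else l)
      base)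

-- ===== PRECONDITION & SPEC =====
-- Pre_ excludes exactly the inputs where Python A raises IndexError (k > len(invert)).
def Pre_legal_inversions (invert : List (Option Bool)) (k : Int) : Prop :=
  k ≤ (invert.length : Int)
instance (invert : List (Option Bool)) (k : Int) : Decidable (Pre_legal_inversions invert k) := by
  unfold Pre_legal_inversions; infer_instance
def pvWitness_legal_inversions : List (Option Bool) × Int := ([none, some true, none], 3)

def Spec_legal_inversions (invert : List (Option Bool)) (k : Int) (out : List (List (Option Bool))) : Prop := out = legal_inversions_alt invert k
instance (invert : List (Option Bool)) (k : Int) (out : List (List (Option Bool))) : Decidable (Spec_legal_inversions invert k out) := by unfold Spec_legal_inversions; infer_instance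

-- ===== CLAIM (what is proved, stated in full; the proofs are below) =====
def Claim_equal_legal_inversions : Prop := ∀ (invert : List (Option Bool)) (k : Int), Dom_legal_inversions invert k → Pre_legal_inversions invert k → Spec_legal_inversions invert k (legal_inversions invert k)

-- ===== LEMMAS AND PROOFS =====

-- Nat-level reference for A's accumulator doubling (dstep/dfold) and for B's bit-indexed
-- completion (bapp/bout); nposs = the None positions below n, setTs = set them all to True.
def dstep (st : List (List (Option Bool))) (i : Nat) : List (List (Option Bool)) :=
  st.map (fun l => l.set i (some true)) ++ st.map (fun l => l.set i (some false))
def dfold (ps : List Nat) (st : List (List (Option Bool))) : List (List (Option Bool)) :=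
  ps.foldl dstep st
def bapp (ps : List Nat) (t0 : Nat) (j : Nat) (b : List (Option Bool)) : List (Option Bool) :=
  match ps with
  | [] => b
  | p :: ps => bapp ps (t0 + 1) j (if j / 2 ^ t0 % 2 = 1 then b.set p (some false) else b)
def bout (ps : List Nat) (b : List (Option Bool)) : List (List (Option Bool)) :=
  (List.range (2 ^ ps.length)).map (fun j => bapp ps 0 j b)
def setTs (ps : List Nat) (b : List (Option Bool)) : List (Option Bool) :=
  ps.foldl (fun l i => l.set i (some true)) b
def nposs (invert : List (Option Bool)) (n : Nat) : List Nat :=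
  (List.range n).filter (fun i => invert[i]? == some none)

lemma dfold_head : ∀ (ps : List Nat) (b : List (Option Bool)) (st : List (List (Option Bool))),
    ∃ rest, dfold ps (b :: st) = setTs ps b :: rest := by
  intro ps
  induction ps with
  | nil => intro b st; exact ⟨st, rfl⟩
  | cons i ps ih =>
    intro b st
    have h : dfold (i :: ps) (b :: st) = dfold ps ((b.set i (some true)) ::
        (st.map (fun l => l.set i (some true)) ++ (b :: st).map (fun l => l.set i (some false)))) := by
      simp [dfold, dstep]
    rw [h]
    have h2 : setTs (i :: ps) b = setTs ps (b.set i (some true)) := rfl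
    rw [h2]
    exact ih _ _
lemma getElem?_setTs (ps : List Nat) (b : List (Option Bool)) (n : Nat)
    (h : ∀ i ∈ ps, i ≠ n) : (setTs ps b)[n]? = b[n]? := by
  induction ps generalizing b with
  | nil => rfl
  | cons i ps ih =>
    have h1 : setTs (i :: ps) b = setTs ps (b.set i (some true)) := rfl
    rw [h1, ih _ (fun j hj => h j (List.mem_cons_of_mem _ hj))]
    exact List.getElem?_set_ne (h i (List.mem_cons_self))
lemma bapp_set_comm (ps : List Nat) (t0 j : Nat) (b : List (Option Bool)) (i : Nat) (a : Option Bool)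
    (h : i ∉ ps) : bapp ps t0 j (b.set i a) = (bapp ps t0 j b).set i a := by
  induction ps generalizing t0 b with
  | nil => rfl
  | cons p ps ih =>
    simp only [bapp]
    have hip : i ≠ p := fun he => h (he ▸ List.mem_cons_self)
    have h' : i ∉ ps := fun hm => h (List.mem_cons_of_mem _ hm)
    by_cases hc : j / 2 ^ t0 % 2 = 1
    · simp only [hc, if_true]
      rw [List.set_comm _ _ hip, ih _ _ h']
    · simp [hc, ih _ _ h']
lemma bapp_congr (ps : List Nat) (t0 j j' : Nat) (b : List (Option Bool))
    (h : ∀ t, t0 ≤ t → t < t0 + ps.length → j / 2 ^ t % 2 = j' / 2 ^ t % 2) :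
    bapp ps t0 j b = bapp ps t0 j' b := by
  induction ps generalizing t0 b with
  | nil => rfl
  | cons p ps ih =>
    simp only [bapp]
    rw [h t0 le_rfl (by simp)]
    exact ih _ _ (fun t h1 h2 => h t (by omega) (by simp at h2 ⊢; omega))
lemma bapp_append (ps : List Nat) (i : Nat) (t0 j : Nat) (b : List (Option Bool)) :
    bapp (ps ++ [i]) t0 j b =
      (if j / 2 ^ (t0 + ps.length) % 2 = 1 then (bapp ps t0 j b).set i (some false)
       else bapp ps t0 j b) := by
  induction ps generalizing t0 b with
  | nil => simp [bapp]
  | cons p ps ih =>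
    simp only [List.cons_append, bapp]
    rw [ih]
    have : t0 + 1 + ps.length = t0 + (p :: ps).length := by simp; omega
    rw [this]
lemma div_pow_mod_two_add (m t j : Nat) (ht : t < m) :
    (2 ^ m + j) / 2 ^ t % 2 = j / 2 ^ t % 2 := by
  have h1 : 2 ^ m = 2 ^ t * 2 ^ (m - t) := by
    rw [← pow_add]; congr 1; omega
  rw [h1, Nat.mul_add_div (Nat.two_pow_pos t)]
  have h2 : 2 ∣ 2 ^ (m - t) := dvd_pow_self 2 (by omega)
  omega
lemma dfold_eq_bout (ps : List Nat) (b : List (Option Bool)) (hnd : ps.Nodup) :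
    dfold ps [b] = bout ps (setTs ps b) := by
  induction ps using List.reverseRecOn generalizing b with
  | nil => simp [dfold, bout, bapp, setTs]
  | append_singleton ps i ih =>
    have hps : ps.Nodup := (List.nodup_append.mp hnd).1
    have hi : i ∉ ps := fun hm => (List.nodup_append.mp hnd).2.2 i hm i (by simp) rfl
    have hB' : setTs (ps ++ [i]) b = (setTs ps b).set i (some true) := by
      simp [setTs, List.foldl_append]
    have hD : dfold (ps ++ [i]) [b] = dstep (dfold ps [b]) i := by
      simp [dfold, List.foldl_append]
    rw [hD, ih b hps, hB']
    have hsplit : List.range (2 ^ (ps.length + 1)) = List.range (2 ^ ps.length) ++ (List.range (2 ^ ps.length)).map (fun j => 2 ^ ps.length + j) := by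
      rw [pow_succ, Nat.mul_two, List.range_add]
    simp only [bout, List.length_append, List.length_singleton, dstep, List.map_map]
    rw [hsplit, List.map_append]
    congr 1
    · refine List.map_congr_left ?_
      intro j hj
      have hjlt : j < 2 ^ ps.length := List.mem_range.mp hj
      rw [bapp_append]
      have h0 : j / 2 ^ (0 + ps.length) % 2 = 0 := by
        rw [Nat.div_eq_of_lt (by simpa using hjlt)]
      rw [h0]
      simp only [if_neg (by omega : ¬ (0:Nat) = 1)]
      rw [bapp_set_comm _ _ _ _ _ _ hi]
      simp [Function.comp]
    · rw [List.map_map]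
      refine List.map_congr_left ?_
      intro j hj
      have hjlt : j < 2 ^ ps.length := List.mem_range.mp hj
      simp only [Function.comp]
      rw [bapp_append]
      have hhigh : (2 ^ ps.length + j) / 2 ^ (0 + ps.length) % 2 = 1 := by
        rw [Nat.zero_add, Nat.add_comm, Nat.add_div_right _ (Nat.two_pow_pos ps.length), Nat.div_eq_of_lt hjlt]
      rw [hhigh, if_pos rfl]
      have hcong : bapp ps 0 (2 ^ ps.length + j) ((setTs ps b).set i (some true)) = bapp ps 0 j ((setTs ps b).set i (some true)) := by
        refine bapp_congr _ _ _ _ _ (fun t h1 h2 => ?_)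
        exact div_pow_mod_two_add ps.length t j (by simpa using h2)
      rw [hcong, bapp_set_comm _ _ _ _ _ _ hi, List.set_set]
lemma nposs_succ_none (invert : List (Option Bool)) (m : Nat) (hv : invert[m]? = some none) :
    nposs invert (m + 1) = nposs invert m ++ [m] := by
  simp [nposs, List.range_succ, List.filter_append, hv]
lemma nposs_succ_some (invert : List (Option Bool)) (m : Nat) (bv : Bool)
    (hv : invert[m]? = some (some bv)) :
    nposs invert (m + 1) = nposs invert m := by
  simp [nposs, List.range_succ, List.filter_append, hv]
lemma nposs_lt (invert : List (Option Bool)) (n : Nat) : ∀ i ∈ nposs invert n, i < n := by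
  intro i hi
  exact List.mem_range.mp (List.mem_filter.mp hi).1
lemma A_fold (invert : List (Option Bool)) (n : Nat) (h : n ≤ invert.length) :
    (List.range n).foldl (fun st (kn : Nat) =>
      match PySem.List.pyGet? (st.headD []) (kn : Int) with
      | some none =>
          st.map (fun l => l.set ((kn : Int)).toNat (some true)) ++
            st.map (fun l => l.set ((kn : Int)).toNat (some false))
      | _ => st) [invert] = dfold (nposs invert n) [invert] := by
  induction n with
  | zero => simp [nposs, dfold]
  | succ m ih =>
    rw [List.range_succ, List.foldl_append, ih (by omega)]
    obtain ⟨rest, hrest⟩ := dfold_head (nposs invert m) invert []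
    have hmem : ∀ i ∈ nposs invert m, i ≠ m := fun i hi => by
      have := nposs_lt invert m i hi; omega
    have hhead : (dfold (nposs invert m) [invert]).headD [] = setTs (nposs invert m) invert := by
      rw [hrest]; rfl
    have hget : PySem.List.pyGet? ((dfold (nposs invert m) [invert]).headD []) (m : Int)
        = invert[m]? := by
      rw [hhead, PySem.List.pyGet?_natCast, getElem?_setTs _ _ _ hmem]
    have hm : m < invert.length := by omega
    simp only [List.foldl_cons, List.foldl_nil, hget]
    rcases hv : invert[m]? with _ | v
    · rw [List.getElem?_eq_none_iff] at hv; omega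
    · rcases v with _ | bv
      · rw [nposs_succ_none invert m hv]
        simp [dfold, List.foldl_append, dstep]
      · rw [nposs_succ_some invert m bv hv]
lemma A_eq (invert : List (Option Bool)) (n : Nat) (h : n ≤ invert.length) :
    legal_inversions invert (n : Int) = dfold (nposs invert n) [invert] := by
  rw [legal_inversions, PySem.List.pyRange_one]
  simp only [Int.sub_zero, Int.toNat_natCast, Int.zero_add]
  rw [List.foldl_map]
  exact A_fold invert n h
lemma enum_fold (ps : List Nat) (t0 jn : Nat) (b : List (Option Bool)) :
    (PySem.List.enumerate (ps.map (Nat.cast : Nat → Int)) (t0 : Int)).foldl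
      (fun l tp =>
        if PySem.Int.mod (PySem.Int.floordiv ((jn : Int)) ((2:Int) ^ tp.1.toNat)) 2 = 1 then
          l.set tp.2.toNat (some false)
        else l) b = bapp ps t0 jn b := by
  induction ps generalizing t0 b with
  | nil => rfl
  | cons p ps ih =>
    simp only [List.map_cons, PySem.List.enumerate_cons, List.foldl_cons, Int.toNat_natCast]
    have hcond : (PySem.Int.mod (PySem.Int.floordiv ((jn : Int)) ((2:Int) ^ t0)) 2 = 1)
        ↔ (jn / 2 ^ t0 % 2 = 1) := by
      have h2 : ((2:Int) ^ t0) = ((2 ^ t0 : Nat) : Int) := by push_cast; ring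
      rw [h2, PySem.Int.floordiv_natCast, show (2:Int) = ((2:Nat) : Int) from rfl,
        PySem.Int.mod_natCast]
      exact_mod_cast Iff.rfl
    simp only [hcond]
    rw [show ((t0 : Int) + 1) = ((t0 + 1 : Nat) : Int) by push_cast; ring]
    rw [ih (t0 + 1)]
    simp only [bapp]
lemma B_eq (invert : List (Option Bool)) (n : Nat) :
    legal_inversions_alt invert (n : Int) = bout (nposs invert n) (setTs (nposs invert n) invert) := by
  rw [legal_inversions_alt]
  have hrange : PySem.List.pyRange 0 (n : Int) 1 = (List.range n).map (Nat.cast : Nat → Int) := by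
    rw [PySem.List.pyRange_one]
    simp
  have hpos : (PySem.List.pyRange 0 (n : Int) 1).filter
      (fun i => PySem.List.pyGet? invert i == some none)
      = (nposs invert n).map (Nat.cast : Nat → Int) := by
    rw [hrange, List.filter_map]
    rw [show ((fun i => PySem.List.pyGet? invert i == some none) ∘ (Nat.cast : Nat → Int))
        = (fun i : Nat => invert[i]? == some none) from
      funext (fun i => by simp [Function.comp, PySem.List.pyGet?_natCast])]
    rfl
  rw [hpos]
  have hbase : ((nposs invert n).map (Nat.cast : Nat → Int)).foldl
      (fun l i => l.set i.toNat (some true)) invert = setTs (nposs invert n) invert := by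
    rw [List.foldl_map]
    simp [setTs]
  rw [hbase]
  have hlen : ((nposs invert n).map (Nat.cast : Nat → Int)).length = (nposs invert n).length := by
    simp
  rw [hlen]
  have hpow : ((2:Int) ^ (nposs invert n).length) = ((2 ^ (nposs invert n).length : Nat) : Int) := by
    push_cast; ring
  rw [hpow]
  have hrange2 : PySem.List.pyRange 0 ((2 ^ (nposs invert n).length : Nat) : Int) 1
      = (List.range (2 ^ (nposs invert n).length)).map (Nat.cast : Nat → Int) := by
    rw [PySem.List.pyRange_one]
    simp only [Int.sub_zero, Int.toNat_natCast, Int.zero_add]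
  rw [hrange2, List.map_map, bout]
  refine List.map_congr_left ?_
  intro j hj
  simp only [Function.comp]
  exact enum_fold (nposs invert n) 0 j (setTs (nposs invert n) invert)
lemma nposs_nodup (invert : List (Option Bool)) (n : Nat) : (nposs invert n).Nodup :=
  List.Nodup.filter _ List.nodup_range

-- ===== VERDICT (by name: the statement is the Claim_ definition above) =====
theorem legal_inversions_spec : Claim_equal_legal_inversions := by
  unfold Claim_equal_legal_inversions Spec_legal_inversions Pre_legal_inversions
  intro invert k _ hPre
  rcases Int.lt_or_le k 0 with hneg | hge
  · have hnil : PySem.List.pyRange 0 k 1 = [] := PySem.List.pyRange_one_eq_nil (le_of_lt hneg)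
    have h01 : PySem.List.pyRange 0 1 1 = [0] := by decide
    rw [legal_inversions, legal_inversions_alt]
    simp [hnil, h01, PySem.List.enumerate_nil]
  · obtain ⟨n, rfl⟩ := Int.eq_ofNat_of_zero_le hge
    have hlen : n ≤ invert.length := by exact_mod_cast hPre
    rw [A_eq invert n hlen, B_eq invert n, dfold_eq_bout _ _ (nposs_nodup invert n)]
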